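-- pv_equiv track=rewrite | github.com/mikekestemont/speechies | converters.py | words2xml
-- ===== SOURCE A (Python) =====
-- def words2xml (words):
--     ds = False
--     text = []
--     region = []
--     for word in words:
--         if word[1] != ds:
--             if region:
--                 text.append ('<said direct="%s">%s</said>' % ('true' if ds else 'false', ' '.join (region)))
--             region = []
--         region.append (word[0])
--         ds = word[1]
--     if region:
--         text.append ('<said direct="%s">%s</said>' % ('true' if ds else 'false', ' '.join (region)))
--     return ''.join (text)
-- ===== SOURCE B (Python) =====
-- def words2xml(words):
--     # Separator-injection rendering: no run detection, no group buffers.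
--     # Emit an opening tag before the first word; between every adjacent pair
--     # emit either a space (same flag) or a close+reopen tag (flag change);
--     # close after the last word.
--     if not words:
--         return ''
--     tag = lambda f: 'true' if f else 'false'
--     parts = ['<said direct="%s">%s' % (tag(words[0][1]), words[0][0])]
--     for (pw, pf), (w, f) in zip(words, words[1:]):
--         parts.append((' ' if f == pf else '</said><said direct="%s">' % tag(f)) + w)
--     parts.append('</said>')
--     return ''.join(parts)
-- ===== Notes on version B (the rewrite author's own statement) =====
-- stated objective: alternative
-- what changed: Instead of detecting runs with a mutable ds flag and a region buffer that is flushed into whole <said> tags, B never builds groups: it emits one opening tag, then for each adjacent word pair injects either a space (same flag) or a close+reopen tag (flag change), and one final closing tag.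
import Mathlib
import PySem

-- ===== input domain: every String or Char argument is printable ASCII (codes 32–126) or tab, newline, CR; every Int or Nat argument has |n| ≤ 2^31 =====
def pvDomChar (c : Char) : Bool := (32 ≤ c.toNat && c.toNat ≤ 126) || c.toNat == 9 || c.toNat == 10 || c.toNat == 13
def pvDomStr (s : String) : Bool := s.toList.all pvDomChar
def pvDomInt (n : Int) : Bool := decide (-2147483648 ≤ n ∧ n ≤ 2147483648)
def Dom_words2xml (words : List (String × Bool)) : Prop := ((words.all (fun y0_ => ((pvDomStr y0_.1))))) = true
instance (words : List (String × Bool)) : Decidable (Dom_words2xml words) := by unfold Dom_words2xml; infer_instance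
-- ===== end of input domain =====

-- B replaces A's run-detection loop (ds/region state, group buffer, duplicated flush) by
-- separator injection: an opening tag, then between each adjacent pair either a space or a
-- close+reopen tag, then one closing tag — no groups are ever built (objective: alternative).

-- ===== PORT A =====
-- the '<said direct="%s">%s</said>' % (…, ' '.join(region)) format
def pvSaidA (ds : Bool) (region : List String) : String :=
  "<said direct=\"" ++ (if ds then "true" else "false") ++ "\">" ++ PySem.Str.join " " region ++ "</said>"

-- one iteration of A's for-loop over state (ds, text, region)
def pvStepA (st : Bool × List String × List String) (word : String × Bool) :
    Bool × List String × List String :=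
  let (ds, text, region) := st
  let (text, region) :=
    if word.2 ≠ ds then
      ((if region ≠ [] then text ++ [pvSaidA ds region] else text), ([] : List String))
    else (text, region)
  (word.2, text, region ++ [word.1])

-- A's post-loop flush and ''.join(text)
def pvFinishA (st : Bool × List String × List String) : String :=
  let (ds, text, region) := st
  PySem.Str.join "" (if region ≠ [] then text ++ [pvSaidA ds region] else text)

def words2xml (words : List (String × Bool)) : String :=
  pvFinishA (words.foldl pvStepA (false, [], []))

-- ===== PORT B =====
-- Source B's tag
def pvTagB (f : Bool) : String := if f then "true" else "false"

-- the separator Source B prepends to each non-first word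
def pvSepB (pf f : Bool) (w : String) : String :=
  (if f == pf then " " else "</said><said direct=\"" ++ pvTagB f ++ "\">") ++ w

def words2xml_alt (words : List (String × Bool)) : String :=
  match words with
  | [] => ""
  | (w0, f0) :: _ =>
    let parts := ["<said direct=\"" ++ pvTagB f0 ++ "\">" ++ w0]
    let parts := (List.zip words words.tail).foldl
        (fun ps p => ps ++ [pvSepB p.1.2 p.2.2 p.2.1]) parts
    PySem.Str.join "" (parts ++ ["</said>"])

-- ===== PRECONDITION & SPEC =====
def Spec_words2xml (words : List (String × Bool)) (out : String) : Prop := out = words2xml_alt words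
instance (words : List (String × Bool)) (out : String) : Decidable (Spec_words2xml words out) := by unfold Spec_words2xml; infer_instance

-- ===== CLAIM (what is proved, stated in full; the proofs are below) =====
def Claim_equal_words2xml : Prop := ∀ (words : List (String × Bool)), Dom_words2xml words → Spec_words2xml words (words2xml words)

-- ===== LEMMAS AND PROOFS =====

theorem pv_flatten_intersperse_nil (l : List (List Char)) :
    (List.intersperse ([] : List Char) l).flatten = l.flatten := by
  induction l with
  | nil => rfl
  | cons x t ih => cases t <;> simp_all [List.intersperse]

theorem pv_join0_nil : PySem.Str.join "" [] = "" := rfl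

theorem pv_join0_cons (x : String) (l : List String) :
    PySem.Str.join "" (x :: l) = x ++ PySem.Str.join "" l := by
  simp only [PySem.Str.join, PySem.Chars.join, List.intercalate, String.toList_empty,
    List.map_cons, pv_flatten_intersperse_nil, List.flatten_cons]
  simp [String.ofList_append]

theorem pv_join0_snoc (t : List String) (s : String) :
    PySem.Str.join "" (t ++ [s]) = PySem.Str.join "" t ++ s := by
  induction t with
  | nil => simp [pv_join0_cons, pv_join0_nil]
  | cons x r ih => simp [pv_join0_cons, ih, String.append_assoc]

theorem pv_ofList_cons (c : Char) (l : List Char) :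
    String.ofList (c :: l) = String.ofList [c] ++ String.ofList l := by
  rw [← String.ofList_append]; rfl

theorem pv_joinsp_cons2 (x y : String) (l : List String) :
    PySem.Str.join " " (x :: y :: l) = x ++ " " ++ PySem.Str.join " " (y :: l) := by
  simp only [PySem.Str.join, PySem.Chars.join, List.intercalate, List.map_cons,
    List.intersperse, List.flatten_cons]
  simp [String.ofList_append, String.append_assoc]
  rw [pv_ofList_cons]

theorem pv_joinsp_one (x : String) : PySem.Str.join " " [x] = x := by
  simp [PySem.Str.join, PySem.Chars.join, List.intercalate]

theorem pv_joinsp_snoc (t : List String) (s : String) (h : t ≠ []) :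
    PySem.Str.join " " (t ++ [s]) = PySem.Str.join " " t ++ " " ++ s := by
  induction t with
  | nil => exact absurd rfl h
  | cons x r ih =>
    cases r with
    | nil => simp [pv_joinsp_cons2, pv_joinsp_one]
    | cons y rs =>
      have := ih (by simp)
      simp only [List.cons_append] at this ⊢
      rw [pv_joinsp_cons2, this, pv_joinsp_cons2]
      simp [String.append_assoc]

-- the concatenation of Source B's inter-word separators, threaded by the previous flag
def pvRestB (pf : Bool) : List (String × Bool) → String
  | [] => ""
  | (w, f) :: rs => pvSepB pf f w ++ pvRestB f rs

theorem pv_foldl_snoc_map (l : List ((String × Bool) × (String × Bool))) (init : List String) :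
    l.foldl (fun ps p => ps ++ [pvSepB p.1.2 p.2.2 p.2.1]) init
      = init ++ l.map (fun p => pvSepB p.1.2 p.2.2 p.2.1) := by
  induction l generalizing init with
  | nil => simp
  | cons x t ih => simp [ih]

theorem pv_zip_rest (x : String × Bool) (xs : List (String × Bool)) :
    PySem.Str.join "" ((List.zip (x :: xs) xs).map (fun p => pvSepB p.1.2 p.2.2 p.2.1))
      = pvRestB x.2 xs := by
  induction xs generalizing x with
  | nil => rfl
  | cons y ys ih =>
    rw [List.zip_cons_cons, List.map_cons, pv_join0_cons, ih y]
    rfl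

theorem pv_alt_cons (w : String) (f : Bool) (rest : List (String × Bool)) :
    words2xml_alt ((w, f) :: rest)
      = "<said direct=\"" ++ pvTagB f ++ "\">" ++ w ++ pvRestB f rest ++ "</said>" := by
  rw [words2xml_alt]
  simp only [List.tail_cons]
  rw [pv_foldl_snoc_map, pv_join0_snoc]
  simp only [List.singleton_append]
  rw [pv_join0_cons, pv_zip_rest (w, f) rest]

-- loop invariant: from a nonempty current region, finishing A's loop yields the flushed text
-- plus one open tag, the region joined, then B's separator rendering of the remaining words
theorem pv_loop (rest : List (String × Bool)) :
    ∀ (ds : Bool) (text region : List String), region ≠ [] →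
      pvFinishA (rest.foldl pvStepA (ds, text, region)) =
        PySem.Str.join "" text ++
          ("<said direct=\"" ++ pvTagB ds ++ "\">" ++ PySem.Str.join " " region ++
            pvRestB ds rest ++ "</said>") := by
  induction rest with
  | nil =>
    intro ds text region hreg
    simp [pvFinishA, hreg, pv_join0_snoc, pvRestB, pvSaidA, pvTagB, String.append_assoc]
  | cons p rs ih =>
    intro ds text region hreg
    obtain ⟨w, f⟩ := p
    by_cases hf : f = ds
    · subst hf
      have hstep : pvStepA (f, text, region) (w, f) = (f, text, region ++ [w]) := by
        simp [pvStepA]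
      rw [List.foldl_cons, hstep, ih f text (region ++ [w]) (by simp)]
      rw [pv_joinsp_snoc region w hreg]
      simp [pvRestB, pvSepB, String.append_assoc]
    · have hstep : pvStepA (ds, text, region) (w, f) = (f, text ++ [pvSaidA ds region], [w]) := by
        simp [pvStepA, hf, hreg]
      rw [List.foldl_cons, hstep, ih f (text ++ [pvSaidA ds region]) [w] (by simp)]
      rw [pv_join0_snoc, pv_joinsp_one]
      have hne : (f == ds) = false := by simpa using hf
      simp [pvRestB, pvSepB, hne, pvSaidA, pvTagB, String.append_assoc]
      rw [show ("</said><said direct=\"" : String) = "</said>" ++ "<said direct=\"" from rfl,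
         String.append_assoc]

-- ===== VERDICT (by name: the statement is the Claim_ definition above) =====
theorem words2xml_spec : Claim_equal_words2xml := by
  intro words _
  unfold Spec_words2xml
  cases words with
  | nil => rfl
  | cons p rs =>
    obtain ⟨w, f⟩ := p
    have hstep : pvStepA (false, [], []) (w, f) = (f, [], [w]) := by
      simp [pvStepA]
    rw [words2xml, List.foldl_cons, hstep, pv_loop rs f [] [w] (by simp), pv_alt_cons]
    rw [pv_joinsp_one, pv_join0_nil]
    simp [String.append_assoc]
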